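-- pv_equiv track=rewrite | github.com/Miller-nl/Mengine | Graphs/Directed/Old/Graph.py | _lists_compare
-- ===== SOURCE A (Python) =====
-- def _lists_compare(parent_list: list, child_list: list) -> bool:
--     '''
--     Функция детектирует вхождение родительского списка в дочерний, кроме случая дублирования.
--     :param parent_list: родительский список
--     :param child_list: дочерний список
--     :return: bool - входит ли родительский список целиком в дочерний
--     '''
--
--     if len(parent_list) >= len(child_list):  # Если длина родителя больше или равна - вхождения точно нет
--         return False
--
--     for parent_token in parent_list:  # Пошли по токенам родителя
--
--         found = False  # Детектор того, найден ли токен родителя в дочерней фразе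
--         for child_token in child_list:  # Сравнивать будем с "потенциальным" ребёнком
--             # Это наиболее быстрый вариант проверки
--             if parent_token < child_token:  # Наиболее частый вариант - "пролёт" мимо (отсутствие совпадения)
--                 # Если токен фразы родителя должен находиться левее текущего элемента дочерней фразы
--                 # И мы дошли до такой ситуации. (мы идём слева на право, и на совпадении прерываем обход)
--                 # Значит, что его вообще нет в текущей фразе.
--                 break  # Закончим поиск слова
--
--             elif parent_token > child_token:
--                 # Если токен фразы родителя должен стоять правее текущего токена дочерней фразы
--                 # (мы идём слева на право, и ещё не дошли до совпадения)
--                 continue  # Перейдём вправо на один токен В ДОЧЕРНЕЙ ФРАЗЕ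
--
--             else:  # Если он не левее и не правее, значит, он равен.
--                 # Если текущий токен фразы родителя вошёл в дочернюю фразу
--                 # Значит, надо брать следующий токен фразы родителя для сравнения.
--                 # Момент оптиимзации - скинем из списка "дочерней фразы" все токены до текущего включительно,
--                 # Т.к. мы знаем, что следующий токен из фразы графа должен быть правее текущего
--                 # ( если во фразе из графа будут два повторяющихся слова, то и в новой фраз их должно быть два)
--                 # Обрежем токены в дочернем наборе слева от текущего
--                 child_list = child_list[child_list.index(child_token) + 1:]
--                 found = True  # Запомним, что слово совпало
--                 break  # Закончили работу с элементом parent_word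
--
--         if not found:  # Если слово не найдено
--             return False  # То вхождения точно нет
--
--     # Еслит мы обошли все токены родительской фразы и не вышли в return, значит, они все содержатся в дочерней фразе
--     return True
-- ===== SOURCE B (Python) =====
-- def _lists_compare(parent_list: list, child_list: list) -> bool:
--     '''Two-pointer merge over both lists, without index() calls or slicing.'''
--     if len(parent_list) >= len(child_list):
--         return False
--     i, j = 0, 0
--     n, m = len(parent_list), len(child_list)
--     while i < n and j < m:
--         p, c = parent_list[i], child_list[j]
--         if p == c:
--             i += 1
--             j += 1
--         elif p > c:
--             j += 1
--         else:
--             return False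
--     return i == n
-- ===== Notes on version B (the rewrite author's own statement) =====
-- stated objective: alternative
-- what changed: Replaced A's per-parent-token rescan with list.index and slicing by a single two-pointer merge over both lists with index arithmetic and no list copying.
import Mathlib
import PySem

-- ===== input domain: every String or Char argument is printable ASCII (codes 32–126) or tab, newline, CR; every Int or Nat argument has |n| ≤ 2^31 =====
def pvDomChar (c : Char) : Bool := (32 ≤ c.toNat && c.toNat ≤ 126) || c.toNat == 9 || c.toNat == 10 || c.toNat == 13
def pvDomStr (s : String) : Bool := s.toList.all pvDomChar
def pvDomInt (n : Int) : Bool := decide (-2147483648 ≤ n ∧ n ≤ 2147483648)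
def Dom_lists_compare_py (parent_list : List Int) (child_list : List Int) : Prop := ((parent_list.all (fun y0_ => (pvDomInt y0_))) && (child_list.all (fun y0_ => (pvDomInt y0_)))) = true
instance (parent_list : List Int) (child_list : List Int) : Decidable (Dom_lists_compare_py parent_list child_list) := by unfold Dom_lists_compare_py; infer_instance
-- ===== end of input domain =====

-- B replaces A's rescan-with-index-and-slice by a single two-pointer merge; return values proved equal on all inputs.

-- ===== PORT A =====
-- inner 'for child_token in child_list' loop of A: scans the suffix `scan` of the
-- current child list `orig`; on a match returns some(orig[orig.index(tok)+1:]),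
-- on break/exhaustion returns none (found = False).
def pvInnerA (tok : Int) (orig : List Int) : List Int → Option (List Int)
  | [] => none
  | c :: rest =>
    if tok < c then none
    else if tok > c then pvInnerA tok orig rest
    else
      match PySem.List.index? orig c with
      | some i => some (PySem.List.slice orig (some ((i : Int) + 1)) none)
      | none => none   -- unreachable in Python: c is an element of orig

-- outer 'for parent_token in parent_list' loop of A
def pvOuterA : List Int → List Int → Bool
  | [], _ => true
  | p :: ps, child =>
    match pvInnerA p child child with
    | none => false
    | some child' => pvOuterA ps child'

def lists_compare_py (parent_list : List Int) (child_list : List Int) : Bool :=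
  if parent_list.length ≥ child_list.length then false
  else pvOuterA parent_list child_list

-- ===== PORT B =====
-- the two-pointer while loop of Source B (index pair rendered as the two list suffixes)
def pvTwoPtr : List Int → List Int → Bool
  | [], _ => true
  | _ :: _, [] => false
  | p :: ps, c :: cs =>
    if p == c then pvTwoPtr ps cs
    else if p > c then pvTwoPtr (p :: ps) cs
    else false

def lists_compare_py_alt (parent_list : List Int) (child_list : List Int) : Bool :=
  if parent_list.length ≥ child_list.length then false
  else pvTwoPtr parent_list child_list

-- ===== PRECONDITION & SPEC =====
def Spec_lists_compare_py (parent_list : List Int) (child_list : List Int) (out : Bool) : Prop := out = lists_compare_py_alt parent_list child_list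
instance (parent_list : List Int) (child_list : List Int) (out : Bool) : Decidable (Spec_lists_compare_py parent_list child_list out) := by unfold Spec_lists_compare_py; infer_instance

-- ===== CLAIM (what is proved, stated in full; the proofs are below) =====
def Claim_equal_lists_compare_py : Prop := ∀ (parent_list : List Int) (child_list : List Int), Dom_lists_compare_py parent_list child_list → Spec_lists_compare_py parent_list child_list (lists_compare_py parent_list child_list)

-- ===== LEMMAS AND PROOFS =====

-- one two-pointer step for a fixed parent token: advance past smaller child
-- elements, succeed with the remaining suffix on equality, fail on a larger one
def pvStep (tok : Int) : List Int → Option (List Int)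
  | [] => none
  | c :: cs =>
    if tok < c then none
    else if tok > c then pvStep tok cs
    else some cs

-- A's inner loop, run on orig = pre ++ scan with every element of pre < tok,
-- computes exactly the two-pointer step on scan.
lemma pvInnerA_eq_step (tok : Int) : ∀ (pre scan : List Int),
    (∀ x ∈ pre, x < tok) → pvInnerA tok (pre ++ scan) scan = pvStep tok scan := by
  intro pre scan
  induction scan generalizing pre with
  | nil => intro _; rfl
  | cons c cs ih =>
    intro hpre
    by_cases h1 : tok < c
    · simp [pvInnerA, pvStep, h1]
    · by_cases h2 : tok > c
      · have := ih (pre ++ [c]) (by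
          intro x hx
          rcases List.mem_append.mp hx with hx | hx
          · exact hpre x hx
          · simp at hx; omega)
        simpa [pvInnerA, pvStep, h1, h2] using this
      · -- tok = c
        have htc : tok = c := by omega
        have hc : c ∉ pre := by
          intro hmem
          have := hpre c hmem
          omega
        have hidx : PySem.List.index? (pre ++ c :: cs) c = some pre.length := by
          have : pre ++ c :: cs = (pre ++ [c]) ++ cs := by simp
          rw [this, PySem.List.index?_append_of_mem cs (by simp)]
          exact PySem.List.index?_append_singleton_self _ _ hc
        have hslice : PySem.List.slice (pre ++ c :: cs) (some ((pre.length : Int) + 1)) none = cs := by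
          have : ((pre.length : Int) + 1) = ((pre.length + 1 : Nat) : Int) := by push_cast; ring
          rw [this, PySem.List.slice_from_natCast]
          simp
        simp only [pvInnerA, pvStep, if_neg h1, if_neg h2, hidx, hslice]

-- B's two-pointer loop in step form
lemma pvTwoPtr_eq_step (p : Int) (ps : List Int) : ∀ (child : List Int),
    pvTwoPtr (p :: ps) child =
      match pvStep p child with
      | none => false
      | some cs => pvTwoPtr ps cs := by
  intro child
  induction child with
  | nil => rfl
  | cons c cs ih =>
    by_cases h1 : p < c
    · have hne : ¬ p == c := by simp; omega
      have h2 : ¬ p > c := by omega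
      simp [pvTwoPtr, pvStep, h1, h2, hne]
    · by_cases h2 : p > c
      · have hne : ¬ p == c := by simp; omega
        simpa [pvTwoPtr, pvStep, h1, h2, hne] using ih
      · have heq : p == c := by simp; omega
        simp [pvTwoPtr, pvStep, h1, h2, heq]

lemma pvOuterA_eq_twoPtr : ∀ (parent child : List Int),
    pvOuterA parent child = pvTwoPtr parent child := by
  intro parent
  induction parent with
  | nil => intro child; cases child <;> rfl
  | cons p ps ih =>
    intro child
    rw [pvTwoPtr_eq_step]
    have h := pvInnerA_eq_step p [] child (by simp)
    simp only [List.nil_append] at h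
    simp only [pvOuterA, h]
    cases pvStep p child with
    | none => rfl
    | some cs => exact ih cs

-- ===== VERDICT (by name: the statement is the Claim_ definition above) =====
theorem lists_compare_py_spec : Claim_equal_lists_compare_py := by
  intro parent child _
  unfold Spec_lists_compare_py lists_compare_py lists_compare_py_alt
  split
  · rfl
  · exact pvOuterA_eq_twoPtr parent child
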